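-- pv_equiv track=rewrite | github.com/liupengsay/PyIsTheBestLang | src/dp/digital_dp/template.py | get_kth_without_d
-- ===== SOURCE A (Python) =====
-- def get_kth_without_d(k, d):
--     # Use decimal to calculate the k-th digit without digit d 0<=d<=9
--     assert 0 <= d <= 9
--     lst = []
--     st = list(range(10))
--     st.remove(d)
--     while k:
--         if d:
--             lst.append(k % 9)
--             k //= 9
--         else:
--             lst.append((k - 1) % 9)
--             k = (k - 1) // 9
--     lst.reverse()
--     # It can also be solved using binary search and digit DP
--     ans = [str(st[i]) for i in lst]
--     return int("".join(ans))
-- ===== SOURCE B (Python) =====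
-- def get_kth_without_d(k, d):
--     # k-th positive integer with no decimal digit equal to d, computed
--     # recursively by pure arithmetic (no list/string building):
--     # peel the lowest result digit, recurse on the quotient.
--     assert 0 <= d <= 9
--     if k == 0:
--         return 0
--     if d:
--         q, r = divmod(k, 9)
--     else:
--         q, r = divmod(k - 1, 9)
--     digit = r if r < d else r + 1
--     return get_kth_without_d(q, d) * 10 + digit
-- ===== Notes on version B (the rewrite author's own statement) =====
-- stated objective: simpler
-- what changed: B replaces A's loop that collects base-9 remainders into a list, reverses it, maps each through the 9-element allowed-digit list, joins the str()s and re-parses with int(), by a direct arithmetic recursion that builds the answer as a number (rec(q)*10 + mapped digit), with the digit map expressed as the closed form 'r if r < d else r+1'.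
import Mathlib
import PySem

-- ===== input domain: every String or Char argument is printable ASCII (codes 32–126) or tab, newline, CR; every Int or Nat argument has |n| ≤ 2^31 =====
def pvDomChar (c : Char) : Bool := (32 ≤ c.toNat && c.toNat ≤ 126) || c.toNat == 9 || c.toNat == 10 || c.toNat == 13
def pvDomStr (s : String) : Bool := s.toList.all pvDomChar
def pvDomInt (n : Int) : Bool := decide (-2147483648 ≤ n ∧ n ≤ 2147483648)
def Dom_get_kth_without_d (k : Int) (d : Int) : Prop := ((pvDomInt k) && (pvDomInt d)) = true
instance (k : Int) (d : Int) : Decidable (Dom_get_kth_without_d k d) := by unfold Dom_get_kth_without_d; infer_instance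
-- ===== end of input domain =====

-- B replaces A's remainder-list/reverse/str-join/int round-trip by a direct arithmetic
-- recursion building the answer as a number; same return value on every admitted input.

-- ===== PORT A =====
-- Hand port of Python's int(s): exact for the strings this program feeds it under
-- Pre_ (k ≥ 1), which are always nonempty sequences of ASCII decimal digits.
def pvParseInt (s : String) : Int :=
  s.toList.foldl (fun a c => a * 10 + ((c.toNat : Int) - 48)) 0

-- the 'while k:' loop; fuel k.toNat + 1 bounds its iterations whenever k ≥ 0
def pvLoopA : Nat → Int → Int → List Int → Int × List Int
  | 0, k, _, lst => (k, lst)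
  | fuel+1, k, d, lst =>
    if k ≠ 0 then
      if d ≠ 0 then
        pvLoopA fuel (PySem.Int.floordiv k 9) d (lst ++ [PySem.Int.mod k 9])
      else
        pvLoopA fuel (PySem.Int.floordiv (k-1) 9) d (lst ++ [PySem.Int.mod (k-1) 9])
    else (k, lst)

def get_kth_without_d (k : Int) (d : Int) : Int :=
  -- st = list(range(10)); st.remove(d)   (the assert's failure cases are outside Pre_)
  let st : List Int := (PySem.List.remove? (PySem.List.pyRange 0 10 1) d).getD []
  let lst := (pvLoopA (k.toNat + 1) k d []).2
  let lstRev := lst.reverse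
  let ans := lstRev.map (fun i => PySem.Int.toStr (PySem.List.pyGetD st i 0))
  pvParseInt (PySem.Str.join "" ans)

-- ===== PORT B =====
-- Source B's recursion; fuel k.toNat + 1 bounds its depth whenever k ≥ 0
def pvAltGo : Nat → Int → Int → Int
  | 0, _, _ => 0
  | fuel+1, k, d =>
    if k = 0 then 0
    else
      let qr := if d ≠ 0 then (PySem.Int.divmod? k 9).getD (0, 0)
                else (PySem.Int.divmod? (k-1) 9).getD (0, 0)
      let digit := if qr.2 < d then qr.2 else qr.2 + 1
      pvAltGo fuel qr.1 d * 10 + digit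

def get_kth_without_d_alt (k : Int) (d : Int) : Int := pvAltGo (k.toNat + 1) k d

-- ===== PRECONDITION & SPEC =====
-- Pre_: exactly where Python A returns a value: the assert needs 0 ≤ d ≤ 9,
-- k = 0 raises ValueError (int('')), and k < 0 never terminates.
def Pre_get_kth_without_d (k : Int) (d : Int) : Prop := 1 ≤ k ∧ 0 ≤ d ∧ d ≤ 9
instance (k : Int) (d : Int) : Decidable (Pre_get_kth_without_d k d) := by unfold Pre_get_kth_without_d; infer_instance
def pvWitness_get_kth_without_d : Int × Int := (7, 3)

def Spec_get_kth_without_d (k : Int) (d : Int) (out : Int) : Prop := out = get_kth_without_d_alt k d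
instance (k : Int) (d : Int) (out : Int) : Decidable (Spec_get_kth_without_d k d out) := by unfold Spec_get_kth_without_d; infer_instance

-- ===== CLAIM (what is proved, stated in full; the proofs are below) =====
def Claim_equal_get_kth_without_d : Prop := ∀ (k : Int) (d : Int), Dom_get_kth_without_d k d → Pre_get_kth_without_d k d → Spec_get_kth_without_d k d (get_kth_without_d k d)

-- ===== LEMMAS AND PROOFS =====

theorem pv_fd (a : Int) : PySem.Int.floordiv a 9 = a / 9 :=
  PySem.Int.floordiv_of_nonneg (by norm_num)

theorem pv_md (a : Int) : PySem.Int.mod a 9 = a % 9 :=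
  PySem.Int.mod_eq_emod_of_pos (by norm_num)

theorem pv_divmod (a : Int) : PySem.Int.divmod? a 9 = some (a / 9, a % 9) := by
  rw [PySem.Int.divmod?]
  rw [if_neg (by norm_num : (9:Int) ≠ 0)]
  rw [Int.fdiv_eq_ediv_of_nonneg a (by norm_num), Int.fmod_eq_emod]
  simp

-- abstract LSB-first digit list shared by both ports' proofs
def pvDigits (d : Int) (k : Int) : List Int :=
  if k ≤ 0 then []
  else if d ≠ 0 then k % 9 :: pvDigits d (k / 9)
  else (k - 1) % 9 :: pvDigits d ((k - 1) / 9)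
termination_by k.toNat
decreasing_by all_goals omega

def pvVal (d : Int) (ds : List Int) : Int :=
  ds.foldr (fun r acc => acc * 10 + (if r < d then r else r + 1)) 0

theorem pvDigits_nonpos (d k : Int) (hk : k ≤ 0) : pvDigits d k = [] := by
  rw [pvDigits, if_pos hk]

theorem pvDigits_pos (d k : Int) (hk : 1 ≤ k) :
    pvDigits d k = if d ≠ 0 then k % 9 :: pvDigits d (k / 9)
      else (k - 1) % 9 :: pvDigits d ((k - 1) / 9) := by
  rw [pvDigits, if_neg (by omega)]

theorem pvDigits_mem (d k r : Int) (hr : r ∈ pvDigits d k) : 0 ≤ r ∧ r ≤ 8 := by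
  by_cases hk : k ≤ 0
  · rw [pvDigits_nonpos d k hk] at hr; simp at hr
  · rw [pvDigits_pos d k (by omega)] at hr
    by_cases hd : d ≠ 0
    · rw [if_pos hd] at hr
      rcases List.mem_cons.mp hr with hr | hr
      · omega
      · exact pvDigits_mem d (k / 9) r hr
    · rw [if_neg hd] at hr
      rcases List.mem_cons.mp hr with hr | hr
      · omega
      · exact pvDigits_mem d ((k - 1) / 9) r hr
termination_by k.toNat
decreasing_by all_goals omega

-- A's loop appends exactly pvDigits
theorem pvLoopA_spec (fuel : Nat) (k d : Int) (acc : List Int)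
    (hk : 0 ≤ k) (hf : k.toNat < fuel) :
    pvLoopA fuel k d acc = (0, acc ++ pvDigits d k) := by
  induction fuel generalizing k acc with
  | zero => omega
  | succ n ih =>
    by_cases h0 : k = 0
    · subst h0; rw [pvLoopA, if_neg (by simp), pvDigits_nonpos d 0 (by omega)]; simp
    · have hk1 : 1 ≤ k := by omega
      rw [pvLoopA, if_pos h0, pvDigits_pos d k hk1]
      by_cases hd : d ≠ 0
      · rw [if_pos hd, if_pos hd, pv_fd, pv_md]
        rw [ih (k / 9) _ (by omega) (by omega)]
        simp
      · rw [if_neg hd, if_neg hd, pv_fd, pv_md]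
        rw [ih ((k - 1) / 9) _ (by omega) (by omega)]
        simp

-- B's recursion computes pvVal of pvDigits
theorem pvAltGo_spec (fuel : Nat) (k d : Int) (hk : 0 ≤ k) (hf : k.toNat < fuel) :
    pvAltGo fuel k d = pvVal d (pvDigits d k) := by
  induction fuel generalizing k with
  | zero => omega
  | succ n ih =>
    by_cases h0 : k = 0
    · subst h0; rw [pvAltGo, if_pos rfl, pvDigits_nonpos d 0 (by omega)]; rfl
    · have hk1 : 1 ≤ k := by omega
      rw [pvAltGo, if_neg h0, pvDigits_pos d k hk1]
      by_cases hd : d ≠ 0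
      · simp only [if_pos hd, pv_divmod, Option.getD_some]
        rw [ih (k / 9) (by omega) (by omega)]
        simp [pvVal]
      · simp only [if_neg hd, pv_divmod, Option.getD_some]
        rw [ih ((k - 1) / 9) (by omega) (by omega)]
        simp [pvVal]

-- the allowed-digit table: st[i] = i if i < d else i + 1
theorem pv_st_get (d i : Int) (hd0 : 0 ≤ d) (hd9 : d ≤ 9) (hi0 : 0 ≤ i) (hi8 : i ≤ 8) :
    PySem.List.pyGetD ((PySem.List.remove? (PySem.List.pyRange 0 10 1) d).getD []) i 0
      = if i < d then i else i + 1 := by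
  interval_cases d <;> interval_cases i <;> decide

-- str(m) for a single digit m, and the code of that character
theorem pv_toStr_digit (m : Int) (h0 : 0 ≤ m) (h9 : m ≤ 9) :
    (PySem.Int.toStr m).toList = [Char.ofNat (m.toNat + 48)] := by
  interval_cases m <;> decide

theorem pv_digitChar_toNat (m : Int) (h0 : 0 ≤ m) (h9 : m ≤ 9) :
    ((Char.ofNat (m.toNat + 48)).toNat : Int) = m + 48 := by
  interval_cases m <;> decide

theorem pv_foldr_congr_mem {α β : Type} (l : List α) (f g : α → β → β) (b : β)
    (h : ∀ x ∈ l, ∀ acc, f x acc = g x acc) : l.foldr f b = l.foldr g b := by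
  induction l with
  | nil => rfl
  | cons x xs ih =>
    simp only [List.foldr_cons]
    rw [ih (fun x hx => h x (List.mem_cons_of_mem _ hx)), h x (List.mem_cons_self)]

-- parsing the joined single-digit strings is the base-10 fold
theorem pv_parse_join (ms : List Int) (h : ∀ m ∈ ms, 0 ≤ m ∧ m ≤ 9) :
    pvParseInt (PySem.Str.join "" (ms.map PySem.Int.toStr))
      = ms.foldl (fun a m => a * 10 + m) 0 := by
  unfold pvParseInt PySem.Str.join
  have h1 : (List.map PySem.Int.toStr ms).map String.toList
      = List.map (fun c => [c]) (ms.map (fun m => Char.ofNat (m.toNat + 48))) := by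
    simp only [List.map_map]
    apply List.map_congr_left
    intro m hm
    exact pv_toStr_digit m (h m hm).1 (h m hm).2
  simp only [h1]
  rw [show ("" : String).toList = [] from rfl]
  rw [PySem.Chars.join_nil_singletons]
  simp only [String.toList_ofList]
  rw [List.foldl_map]
  apply PySem.List.foldl_congr_mem
  intro acc m hm
  rw [pv_digitChar_toNat m (h m hm).1 (h m hm).2]
  ring

-- ===== VERDICT (by name: the statement is the Claim_ definition above) =====
theorem get_kth_without_d_spec : Claim_equal_get_kth_without_d := by
  intro k d _ hpre
  obtain ⟨hk, hd0, hd9⟩ := hpre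
  unfold Spec_get_kth_without_d get_kth_without_d get_kth_without_d_alt
  rw [pvLoopA_spec (k.toNat + 1) k d [] (by omega) (by omega)]
  rw [pvAltGo_spec (k.toNat + 1) k d (by omega) (by omega)]
  simp only [List.nil_append]
  have hb : ∀ i ∈ (pvDigits d k).reverse,
      0 ≤ (if i < d then i else i + 1) ∧ (if i < d then i else i + 1) ≤ 9 := by
    intro i hi
    have := pvDigits_mem d k i (List.mem_reverse.mp hi)
    split <;> omega
  have hmap : (pvDigits d k).reverse.map
        (fun i => PySem.Int.toStr (PySem.List.pyGetD
          ((PySem.List.remove? (PySem.List.pyRange 0 10 1) d).getD []) i 0))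
      = ((pvDigits d k).reverse.map (fun i => if i < d then i else i + 1)).map PySem.Int.toStr := by
    rw [List.map_map]
    apply List.map_congr_left
    intro i hi
    have hbd := pvDigits_mem d k i (List.mem_reverse.mp hi)
    simp only [Function.comp]
    rw [pv_st_get d i hd0 hd9 hbd.1 hbd.2]
  rw [hmap]
  rw [pv_parse_join _ (by
    intro m hm
    rcases List.mem_map.mp hm with ⟨i, hi, rfl⟩
    exact hb i hi)]
  rw [List.foldl_map, List.foldl_reverse]
  unfold pvVal
  apply pv_foldr_congr_mem
  intro x hx acc
  rfl
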